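-- pv_equiv track=rewrite | github.com/Raha-R8/Threes_game | part5.py | up_change
-- ===== SOURCE A (Python) =====
-- n = 4
--
-- def left_change(mat):
--     mat2=[]
--     for list1 in mat:
--         list1=[int(x) for x in list1]
--         for i in range(len(list1)-1):
--             if list1[i]==0:
--                 list1[i+1],list1[i]=list1[i],list1[i+1]
--             else:
--                 if (list1[i]==1 and list1[i+1]==2) or (list1[i]==2 and list1[i+1]==1):
--                     list1[i] = 3
--                     list1[i+1] = 0
--                 else:
--                     if list1[i] == list1[i+1] and list1[i]!=1 and list1[i]!=2:
--                         list1[i]= 2*list1[i]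
--                         list1[i+1] = 0
--         mat2+=[list1]
--     return mat2
--
-- def up_change(mat,n1=n):
--     mat2 =[]
--     j = 0
--     while j<n1:
--         ls =[]
--         for i in range(n1):
--             ls+=[mat[i][j]]
--             ls = [int(x) for x in ls]
--         mat2+=[ls]
--         j+=1
--     mat3 = left_change(mat2)
--     mat4 =[]
--     j = 0
--     while j<n1:
--         ls =[]
--         for i in range(n1):
--             ls+=[mat3[i][j]]
--             ls = [int(x) for x in ls]
--         mat4+=[ls]
--         j+=1
--     return mat4
-- ===== SOURCE B (Python) =====
-- n = 4
--
-- def up_change(mat, n1=n):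
--     def merge(xs):
--         if len(xs) < 2:
--             return xs[:]
--         x, y, rest = xs[0], xs[1], xs[2:]
--         if x == 0:
--             return [y] + merge([0] + rest)
--         if (x, y) in ((1, 2), (2, 1)):
--             return [3] + merge([0] + rest)
--         if x == y and x not in (1, 2):
--             return [2 * x] + merge([0] + rest)
--         return [x] + merge([y] + rest)
--     cols = [merge([int(mat[i][j]) for i in range(n1)]) for j in range(n1)]
--     return [[cols[j][i] for j in range(n1)] for i in range(n1)]
-- ===== Notes on version B (the rewrite author's own statement) =====
-- stated objective: simpler
-- what changed: B drops A's transpose->left_change->transpose pipeline and its intermediate matrices: it merges each column directly with a small recursive single-pass merge and assembles the result grid with comprehensions.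
import Mathlib
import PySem

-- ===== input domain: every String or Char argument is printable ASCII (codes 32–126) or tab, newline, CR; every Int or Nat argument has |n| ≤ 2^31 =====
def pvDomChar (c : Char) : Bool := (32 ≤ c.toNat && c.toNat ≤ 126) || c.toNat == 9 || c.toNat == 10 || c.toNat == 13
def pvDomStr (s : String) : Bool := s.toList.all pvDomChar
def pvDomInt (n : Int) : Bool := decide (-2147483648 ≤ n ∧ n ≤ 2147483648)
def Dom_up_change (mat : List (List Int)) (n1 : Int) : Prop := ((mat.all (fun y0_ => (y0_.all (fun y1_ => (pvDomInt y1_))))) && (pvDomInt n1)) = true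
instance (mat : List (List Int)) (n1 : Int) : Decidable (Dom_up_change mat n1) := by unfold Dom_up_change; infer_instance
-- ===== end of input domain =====

-- B replaces A's transpose → row-merge → transpose pipeline with a direct per-column
-- recursive merge and a comprehension-built result grid (objective: simpler).
-- int(x) on an int is the identity, so A's `[int(x) for x in ls]` re-coercions are ported as the lists themselves.

-- ===== PORT A =====
-- one step of left_change's in-place index loop: list1[i], list1[i+1] are read and reassigned
def pvLeftStep (l : List Int) (i : Nat) : List Int :=
  let a := l.getD i 0
  let b := l.getD (i + 1) 0
  if a = 0 then (l.set i b).set (i + 1) a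
  else if (a = 1 ∧ b = 2) ∨ (a = 2 ∧ b = 1) then (l.set i 3).set (i + 1) 0
  else if a = b ∧ a ≠ 1 ∧ a ≠ 2 then (l.set i (2 * a)).set (i + 1) 0
  else l

-- left_change: for each row, the single pass `for i in range(len(list1)-1)`
def pvLeftChange (mat : List (List Int)) : List (List Int) :=
  mat.map (fun row => (List.range (row.length - 1)).foldl pvLeftStep row)

-- the `while j < n1: ls = [mat[i][j] for i in range(n1)]` transpose loops of up_change
-- (mat[i][j] is total here via getD; Pre_ excludes the inputs where Python raises IndexError)
def pvTranspose (m : List (List Int)) (n1 : Int) : List (List Int) :=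
  (List.range n1.toNat).map (fun j => (List.range n1.toNat).map (fun i => (m.getD i []).getD j 0))

def up_change (mat : List (List Int)) (n1 : Int) : List (List Int) :=
  let mat2 := pvTranspose mat n1
  let mat3 := pvLeftChange mat2
  pvTranspose mat3 n1

-- ===== PORT B =====
-- B's recursive single-pass merge on one column
def pvMerge : List Int → List Int
  | [] => []
  | [x] => [x]
  | x :: y :: rest =>
    if x = 0 then y :: pvMerge (0 :: rest)
    else if (x = 1 ∧ y = 2) ∨ (x = 2 ∧ y = 1) then 3 :: pvMerge (0 :: rest)
    else if x = y ∧ x ≠ 1 ∧ x ≠ 2 then (2 * x) :: pvMerge (0 :: rest)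
    else x :: pvMerge (y :: rest)
termination_by xs => xs.length

def up_change_alt (mat : List (List Int)) (n1 : Int) : List (List Int) :=
  let cols := (List.range n1.toNat).map
    (fun j => pvMerge ((List.range n1.toNat).map (fun i => (mat.getD i []).getD j 0)))
  (List.range n1.toNat).map (fun i => (List.range n1.toNat).map (fun j => (cols.getD j []).getD i 0))

-- ===== PRECONDITION & SPEC =====
-- Pre_ excludes exactly the inputs where Python A raises IndexError: for positive n1,
-- mat must have at least n1 rows and each of its first n1 rows at least n1 entries.
def Pre_up_change (mat : List (List Int)) (n1 : Int) : Prop :=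
  n1 ≤ 0 ∨ (n1 ≤ mat.length ∧ (mat.take n1.toNat).all (fun r => n1 ≤ r.length))
instance (mat : List (List Int)) (n1 : Int) : Decidable (Pre_up_change mat n1) := by unfold Pre_up_change; infer_instance

def pvWitness_up_change : List (List Int) × Int := ([[1, 2], [2, 1]], 2)

def Spec_up_change (mat : List (List Int)) (n1 : Int) (out : List (List Int)) : Prop := out = up_change_alt mat n1
instance (mat : List (List Int)) (n1 : Int) (out : List (List Int)) : Decidable (Spec_up_change mat n1 out) := by unfold Spec_up_change; infer_instance

-- ===== CLAIM (what is proved, stated in full; the proofs are below) =====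
def Claim_equal_up_change : Prop := ∀ (mat : List (List Int)) (n1 : Int), Dom_up_change mat n1 → Pre_up_change mat n1 → Spec_up_change mat n1 (up_change mat n1)

-- ===== LEMMAS AND PROOFS =====

lemma pv_getD_append (pre : List Int) (x : Int) (r : List Int) (d : Int) :
    (pre ++ x :: r).getD pre.length d = x := by
  simp

lemma pv_getD_append_one (pre : List Int) (x y : Int) (r : List Int) (d : Int) :
    (pre ++ x :: y :: r).getD (pre.length + 1) d = y := by
  induction pre with
  | nil => rfl
  | cons a t ih =>
    simp only [List.cons_append, List.length_cons, List.getD_cons_succ]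
    exact ih

lemma pv_set_append (pre : List Int) (x : Int) (r : List Int) (v : Int) :
    (pre ++ x :: r).set pre.length v = pre ++ v :: r := by
  simp

lemma pv_set_append_one (pre : List Int) (x y : Int) (r : List Int) (v : Int) :
    (pre ++ x :: y :: r).set (pre.length + 1) v = pre ++ x :: v :: r := by
  induction pre with
  | nil => rfl
  | cons a t ih =>
    simp only [List.cons_append, List.length_cons, List.set_cons_succ]
    rw [ih]

-- loop invariant: processing indices pre.length … pre.length + rest.length - 1 of
-- pre ++ x :: rest merges the suffix x :: rest and leaves pre untouched
lemma pv_loop_eq_merge (rest : List Int) : ∀ (x : Int) (pre : List Int),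
    (List.range' pre.length rest.length).foldl pvLeftStep (pre ++ x :: rest) =
      pre ++ pvMerge (x :: rest) := by
  induction rest with
  | nil => intro x pre; simp [pvMerge]

  | cons y rs ih =>
    intro x pre
    rw [List.length_cons, List.range'_succ, List.foldl_cons]
    have hstep : pvLeftStep (pre ++ x :: y :: rs) pre.length =
        if x = 0 then pre ++ y :: 0 :: rs
        else if (x = 1 ∧ y = 2) ∨ (x = 2 ∧ y = 1) then pre ++ (3 : Int) :: 0 :: rs
        else if x = y ∧ x ≠ 1 ∧ x ≠ 2 then pre ++ (2 * x) :: 0 :: rs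
        else pre ++ x :: y :: rs := by
      simp only [pvLeftStep, pv_getD_append, pv_getD_append_one]
      split_ifs with h1 h2 h3
      · rw [pv_set_append, pv_set_append_one, h1]
      · rw [pv_set_append, pv_set_append_one]
      · rw [pv_set_append, pv_set_append_one]
      · rfl
    rw [hstep]
    unfold pvMerge
    split_ifs with h1 h2 h3
    · have := ih 0 (pre ++ [y]); simpa using this
    · have := ih 0 (pre ++ [3]); simpa using this
    · have := ih 0 (pre ++ [2 * x]); simpa using this
    · have := ih y (pre ++ [x]); simpa using this

lemma pv_row_merge (l : List Int) :
    (List.range (l.length - 1)).foldl pvLeftStep l = pvMerge l := by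
  cases l with
  | nil => simp [pvMerge]
  | cons x rest =>
    have := pv_loop_eq_merge rest x []
    simpa [List.range_eq_range'] using this

-- ===== VERDICT (by name: the statement is the Claim_ definition above) =====
theorem up_change_spec : Claim_equal_up_change := by
  intro mat n1 _ _
  unfold Spec_up_change up_change up_change_alt pvLeftChange pvTranspose
  simp only [List.map_map, Function.comp_def, pv_row_merge]
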